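-- pv_equiv track=rewrite | github.com/paiml/depyler | examples/hard_nested_loops.py | max_subarray_per_row
-- ===== SOURCE A (Python) =====
-- def max_subarray_per_row(matrix: list[list[int]]) -> list[int]:
--     """Apply Kadane's algorithm to each row, returning max subarray sum per row."""
--     result: list[int] = []
--     for row in matrix:
--         if len(row) == 0:
--             result.append(0)
--         else:
--             max_sum: int = row[0]
--             current: int = row[0]
--             for idx in range(1, len(row)):
--                 candidate: int = current + row[idx]
--                 if candidate > row[idx]:
--                     current = candidate
--                 else:
--                     current = row[idx]
--                 if current > max_sum:
--                     max_sum = current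
--             result.append(max_sum)
--     return result
-- ===== SOURCE B (Python) =====
-- def _row_best(row):
--     """Best nonempty-subarray sum: prefix sums minus running minimum prefix."""
--     if not row:
--         return 0
--     prefix = 0
--     min_prefix = 0
--     best = row[0]
--     for x in row:
--         prefix += x
--         best = max(best, prefix - min_prefix)
--         min_prefix = min(min_prefix, prefix)
--     return best
--
--
-- def max_subarray_per_row(matrix):
--     return [_row_best(row) for row in matrix]
-- ===== Notes on version B (the rewrite author's own statement) =====
-- stated objective: alternative
-- what changed: Replaces Kadane's best-subarray-ending-here DP (foldl with append accumulator) with a per-row helper mapped over the matrix that scans prefix sums and subtracts the running minimum prefix (empty prefix included).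
import Mathlib
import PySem

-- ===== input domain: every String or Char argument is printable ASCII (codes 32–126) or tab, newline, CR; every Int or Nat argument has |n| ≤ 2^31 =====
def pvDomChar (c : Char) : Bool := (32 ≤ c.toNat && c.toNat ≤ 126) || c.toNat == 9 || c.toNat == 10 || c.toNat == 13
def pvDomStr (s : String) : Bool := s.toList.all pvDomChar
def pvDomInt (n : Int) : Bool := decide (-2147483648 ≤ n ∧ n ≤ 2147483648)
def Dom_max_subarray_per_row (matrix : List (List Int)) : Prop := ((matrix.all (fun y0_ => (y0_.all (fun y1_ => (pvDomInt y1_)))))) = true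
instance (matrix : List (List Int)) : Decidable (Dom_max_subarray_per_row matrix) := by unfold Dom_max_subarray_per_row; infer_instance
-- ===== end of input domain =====

-- ===== PORT A =====
-- B maps a prefix-sum / running-minimum-prefix row helper over the matrix instead of Kadane's DP fold; alternative algorithm, same cost.
def stepA (s : Int × Int) (x : Int) : Int × Int :=
  let cand := s.1 + x
  let cur := if cand > x then cand else x
  (cur, if cur > s.2 then cur else s.2)

def max_subarray_per_row (matrix : List (List Int)) : List Int :=
  matrix.foldl (fun result row =>
    match row with
    | [] => result ++ [0]
    | h :: t => result ++ [(t.foldl stepA (h, h)).2]) []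

-- ===== PORT B =====
def rowGo (pfx minp best : Int) : List Int → Int
  | [] => best
  | x :: t => rowGo (pfx + x) (min minp (pfx + x)) (max best (pfx + x - minp)) t

def rowBest : List Int → Int
  | [] => 0
  | h :: t => rowGo 0 0 h (h :: t)

def max_subarray_per_row_alt (matrix : List (List Int)) : List Int :=
  matrix.map rowBest

-- ===== PRECONDITION & SPEC =====
def Spec_max_subarray_per_row (matrix : List (List Int)) (out : List Int) : Prop := out = max_subarray_per_row_alt matrix
instance (matrix : List (List Int)) (out : List Int) : Decidable (Spec_max_subarray_per_row matrix out) := by unfold Spec_max_subarray_per_row; infer_instance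

-- ===== CLAIM (what is proved, stated in full; the proofs are below) =====
def Claim_equal_max_subarray_per_row : Prop := ∀ (matrix : List (List Int)), Dom_max_subarray_per_row matrix → Spec_max_subarray_per_row matrix (max_subarray_per_row matrix)

-- ===== LEMMAS AND PROOFS =====
lemma loop_inv : ∀ (t : List Int) (pfx minp best cur : Int),
    pfx - minp = max cur 0 →
    (t.foldl stepA (cur, best)).2 = rowGo pfx minp best t := by
  intro t
  induction t with
  | nil => intro _ _ _ _ _; rfl
  | cons x t ih =>
    intro pfx minp best cur h
    simp only [List.foldl, stepA, rowGo]
    have hc : pfx + x - minp = (if cur + x > x then cur + x else x) := by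
      rw [max_def] at h; split_ifs at h ⊢ <;> omega
    rw [hc]
    have hb : (if (if cur + x > x then cur + x else x) > best then
        (if cur + x > x then cur + x else x) else best)
        = max best (if cur + x > x then cur + x else x) := by
      rw [max_def]; split_ifs <;> omega
    rw [hb]
    apply ih
    rw [max_def, min_def]
    split_ifs <;> rw [max_def] at h <;> split_ifs at h <;> omega

lemma row_eq (h : Int) (t : List Int) :
    (t.foldl stepA (h, h)).2 = rowBest (h :: t) := by
  simp only [rowBest, rowGo]
  have e1 : (0 : Int) + h = h := by ring
  rw [e1]
  have e2 : min (0 : Int) h = min 0 h := rfl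
  have e3 : max h (h - 0) = h := by simp
  rw [e3]
  apply loop_inv
  rw [max_def, min_def]; split_ifs <;> omega

lemma acc_eq : ∀ (matrix : List (List Int)) (res : List Int),
    matrix.foldl (fun result row =>
      match row with
      | [] => result ++ [0]
      | h :: t => result ++ [(t.foldl stepA (h, h)).2]) res =
    res ++ matrix.map rowBest := by
  intro matrix
  induction matrix with
  | nil => intro res; simp
  | cons row m ih =>
    intro res
    cases row with
    | nil => simp only [List.foldl, List.map, rowBest]; rw [ih]; simp
    | cons h t =>
      simp only [List.foldl, List.map]
      rw [ih, row_eq]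
      simp

-- ===== VERDICT (by name: the statement is the Claim_ definition above) =====
theorem max_subarray_per_row_spec : Claim_equal_max_subarray_per_row := by
  intro matrix _
  unfold Spec_max_subarray_per_row max_subarray_per_row max_subarray_per_row_alt
  rw [acc_eq]
  simp
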